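-- pv_equiv track=rewrite | github.com/Andreaierardi/Appunti-Triennale-Informatica | 1°Anno/1° semestre/Programmazione1 - Manzini/Lezioni/Lezione 27-10-16.py | tutti_minori_nobreak
-- ===== SOURCE A (Python) =====
-- def tutti_minori_nobreak(lis, n):
--     assert isinstance(lis, list), "Il primo agomento deve essere lista"
--     assert isinstance(n,int), "Il secondo argomnto deve essere intero"
--     tutti_piccoli = True
--     i=0
--     while i<len(lis) and tutti_piccoli==True:
--         if lis[i]>= n:
--             tutti_piccoli = False
--         i += 1
--     return tutti_piccoli
-- ===== SOURCE B (Python) =====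
-- def tutti_minori_nobreak(lis, n):
--     assert isinstance(lis, list), "Il primo agomento deve essere lista"
--     assert isinstance(n, int), "Il secondo argomnto deve essere intero"
--     return not lis or max(lis) < n
-- ===== Notes on version B (the rewrite author's own statement) =====
-- stated objective: simpler
-- what changed: Replaces the boolean-sentinel while loop over indices by a single reduction: empty-list guard plus max(lis) < n, compared once.
import Mathlib
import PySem

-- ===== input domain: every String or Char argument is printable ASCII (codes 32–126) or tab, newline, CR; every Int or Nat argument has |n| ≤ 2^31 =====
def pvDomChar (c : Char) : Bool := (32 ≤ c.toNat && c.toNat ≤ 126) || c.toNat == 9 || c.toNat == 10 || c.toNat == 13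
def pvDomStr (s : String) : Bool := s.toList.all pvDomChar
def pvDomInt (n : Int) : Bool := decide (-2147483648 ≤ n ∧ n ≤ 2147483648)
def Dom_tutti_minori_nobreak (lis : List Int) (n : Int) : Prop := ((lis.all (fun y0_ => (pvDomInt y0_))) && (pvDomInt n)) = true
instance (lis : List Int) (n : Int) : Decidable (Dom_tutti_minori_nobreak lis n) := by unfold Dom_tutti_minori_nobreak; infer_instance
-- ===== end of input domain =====

-- B replaces A's boolean-sentinel index loop by an empty-list guard plus a single max-reduction comparison (objective: simpler).

-- ===== PORT A =====
-- the while loop: runs while elements remain and tutti_piccoli is still true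
def tuttiMinoriLoopA (lis : List Int) (n : Int) (tutti_piccoli : Bool) : Bool :=
  match lis with
  | [] => tutti_piccoli
  | x :: rest =>
    if tutti_piccoli = true then
      tuttiMinoriLoopA rest n (if x ≥ n then false else tutti_piccoli)
    else tutti_piccoli

def tutti_minori_nobreak (lis : List Int) (n : Int) : Bool :=
  tuttiMinoriLoopA lis n true

-- ===== PORT B =====
-- 'not lis or max(lis) < n'
def tutti_minori_nobreak_alt (lis : List Int) (n : Int) : Bool :=
  if lis.isEmpty then true
  else
    match PySem.List.max? lis (fun y => y) with
    | some m => decide (m < n)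
    | none => true

-- ===== PRECONDITION & SPEC =====
def Spec_tutti_minori_nobreak (lis : List Int) (n : Int) (out : Bool) : Prop := out = tutti_minori_nobreak_alt lis n
instance (lis : List Int) (n : Int) (out : Bool) : Decidable (Spec_tutti_minori_nobreak lis n out) := by unfold Spec_tutti_minori_nobreak; infer_instance

-- ===== CLAIM (what is proved, stated in full; the proofs are below) =====
def Claim_equal_tutti_minori_nobreak : Prop := ∀ (lis : List Int) (n : Int), Dom_tutti_minori_nobreak lis n → Spec_tutti_minori_nobreak lis n (tutti_minori_nobreak lis n)

-- ===== LEMMAS AND PROOFS =====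

-- A's loop with flag true returns whether every element is < n
theorem loopA_all (lis : List Int) (n : Int) :
    tuttiMinoriLoopA lis n true = lis.all (fun x => decide (x < n)) := by
  induction lis with
  | nil => rfl
  | cons x rest ih =>
    by_cases h : x ≥ n
    · simp only [tuttiMinoriLoopA, if_pos h]
      have hfalse : ∀ l, tuttiMinoriLoopA l n false = false := by
        intro l; cases l <;> simp [tuttiMinoriLoopA]
      have hx : decide (x < n) = false := by simpa using h
      simp [hfalse, List.all_cons, hx]
    · simp only [tuttiMinoriLoopA, if_neg h, ih, List.all_cons]
      have : decide (x < n) = true := decide_eq_true (by omega)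
      simp [this]

-- B returns whether every element is < n
theorem alt_all (lis : List Int) (n : Int) :
    tutti_minori_nobreak_alt lis n = lis.all (fun x => decide (x < n)) := by
  cases lis with
  | nil => rfl
  | cons x rest =>
    simp only [tutti_minori_nobreak_alt, List.isEmpty_cons, if_neg Bool.false_ne_true,
      PySem.List.max?_id_cons]
    have hmem : rest.foldl max x ∈ x :: rest := by
      have := PySem.List.max?_mem (xs := x :: rest) (key := fun y => y)
        (m := rest.foldl max x) (by simp [PySem.List.max?_id_cons])
      exact this
    have hmax : ∀ y ∈ x :: rest, y ≤ rest.foldl max x := by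
      intro y hy
      exact PySem.List.max?_isMax (xs := x :: rest) (key := fun y => y)
        (m := rest.foldl max x) (by simp [PySem.List.max?_id_cons]) y hy
    by_cases h : rest.foldl max x < n
    · have : ∀ y ∈ x :: rest, decide (y < n) = true := by
        intro y hy; have := hmax y hy; simp; omega
      simp [h, List.all_eq_true.mpr this]
    · have : ¬ (x :: rest).all (fun y => decide (y < n)) = true := by
        simp only [List.all_eq_true]
        intro hall
        have := hall _ hmem
        simp at this; omega
      simp [h] at this ⊢
      exact this

-- ===== VERDICT (by name: the statement is the Claim_ definition above) =====
theorem tutti_minori_nobreak_spec : Claim_equal_tutti_minori_nobreak := by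
  intro lis n _
  show tutti_minori_nobreak lis n = tutti_minori_nobreak_alt lis n
  rw [tutti_minori_nobreak, loopA_all, alt_all]
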